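-- pv_equiv track=rewrite | github.com/dipta-roy/TwinScope | app/services/file_io.py | _split_lines_preserve_endings
-- ===== SOURCE A (Python) =====
-- def _split_lines_preserve_endings(content: str) -> list[str]:
--     """Split content into lines, preserving line endings."""
--     lines = []
--     current = []
--
--     i = 0
--     while i < len(content):
--         char = content[i]
--         current.append(char)
--
--         if char == '\n':
--             lines.append(''.join(current))
--             current = []
--         elif char == '\r':
--             if i + 1 < len(content) and content[i + 1] == '\n':
--                 current.append('\n')
--                 i += 1
--             lines.append(''.join(current))
--             current = []
--
--         i += 1
--
--     if current:
--         lines.append(''.join(current))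
--
--     return lines
-- ===== SOURCE B (Python) =====
-- def _split_lines_preserve_endings(content: str) -> list[str]:
--     """Split content into lines, preserving line endings."""
--     return content.splitlines(keepends=True)
-- ===== Notes on version B (the rewrite author's own statement) =====
-- stated objective: idiomatic
-- what changed: Replaces the manual index loop with per-character buffer and lookahead by a single call to str.splitlines(keepends=True), which agrees with A on the task's ASCII domain (\n, \r, \r\n endings).
import Mathlib
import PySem

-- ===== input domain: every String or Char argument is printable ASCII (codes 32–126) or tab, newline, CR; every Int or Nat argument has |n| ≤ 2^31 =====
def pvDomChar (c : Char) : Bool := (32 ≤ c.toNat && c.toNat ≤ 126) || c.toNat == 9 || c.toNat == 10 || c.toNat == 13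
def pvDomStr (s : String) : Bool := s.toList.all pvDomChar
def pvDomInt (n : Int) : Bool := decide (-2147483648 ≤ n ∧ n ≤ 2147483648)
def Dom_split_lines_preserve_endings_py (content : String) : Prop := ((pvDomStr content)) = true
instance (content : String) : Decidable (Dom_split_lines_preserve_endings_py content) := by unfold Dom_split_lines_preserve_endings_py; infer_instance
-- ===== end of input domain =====

-- B replaces A's manual index loop/char buffer with the idiomatic str.splitlines(keepends=True)
-- (exact on the ASCII domain: only '\n', '\r', '\r\n' endings occur there).


-- ===== PORT A =====
-- A's while loop over indices, transliterated as recursion on the remaining characters: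
-- `rest` is content[i:], `rest.head?` is the lookahead content[i+1]; ''.join(current) is String.mk.
def pvAGo (rest : List Char) (lines : List String) (current : List Char) : List String :=
  match rest with
  | [] => if current = [] then lines else lines ++ [String.mk current]
  | c :: rest =>
    let current' := current ++ [c]
    if c = '\n' then
      pvAGo rest (lines ++ [String.mk current']) []
    else if c = '\r' then
      if rest.head? = some '\n' then
        pvAGo rest.tail (lines ++ [String.mk (current' ++ ['\n'])]) []
      else
        pvAGo rest (lines ++ [String.mk current']) []
    else
      pvAGo rest lines current'
termination_by rest.length
decreasing_by
  all_goals (simp [List.length_tail]; try omega)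

def split_lines_preserve_endings_py (content : String) : List String :=
  pvAGo content.toList [] []

-- ===== PORT B =====
-- hand port of CPython str.splitlines(keepends=True): one maximal non-break run plus its
-- terminator per line ('\r\n' as one ending). Exact on Dom (no '\v','\f','\x1c'-'\x1e',
-- '\x85', U+2028/29 occur there).
def pvNotBreak (c : Char) : Bool := !(c == '\n' || c == '\r')

def pvBGo (cs : List Char) : List (List Char) :=
  let pre := cs.takeWhile pvNotBreak
  if hr : cs.dropWhile pvNotBreak = [] then
    if pre = [] then [] else [pre]
  else if (cs.dropWhile pvNotBreak).head hr = '\r' ∧ (cs.dropWhile pvNotBreak).tail.head? = some '\n' then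
    (pre ++ ['\r', '\n']) :: pvBGo (cs.dropWhile pvNotBreak).tail.tail
  else
    (pre ++ [(cs.dropWhile pvNotBreak).head hr]) :: pvBGo (cs.dropWhile pvNotBreak).tail
termination_by cs.length
decreasing_by
  all_goals
    have h1 := List.length_dropWhile_le pvNotBreak cs
    have h2 := List.length_pos_of_ne_nil hr
    simp [List.length_tail]
    omega

def split_lines_preserve_endings_py_alt (content : String) : List String :=
  (pvBGo content.toList).map String.mk

-- ===== PRECONDITION & SPEC =====
def Spec_split_lines_preserve_endings_py (content : String) (out : List String) : Prop := out = split_lines_preserve_endings_py_alt content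
instance (content : String) (out : List String) : Decidable (Spec_split_lines_preserve_endings_py content out) := by unfold Spec_split_lines_preserve_endings_py; infer_instance

-- ===== CLAIM (what is proved, stated in full; the proofs are below) =====
def Claim_equal_split_lines_preserve_endings_py : Prop := ∀ (content : String), Dom_split_lines_preserve_endings_py content → Spec_split_lines_preserve_endings_py content (split_lines_preserve_endings_py content)

-- ===== LEMMAS AND PROOFS =====

/-- Prepend a pending buffer onto the first line of a line list. -/
def pvMerge (cur : List Char) : List (List Char) → List (List Char)
  | [] => if cur = [] then [] else [cur]
  | l :: ls => (cur ++ l) :: ls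

theorem pvMerge_nil (L : List (List Char)) : pvMerge [] L = L := by
  cases L <;> simp [pvMerge]

theorem pvMerge_merge (cur : List Char) (c : Char) (L : List (List Char)) :
    pvMerge cur (pvMerge [c] L) = pvMerge (cur ++ [c]) L := by
  cases L <;> simp [pvMerge]

theorem pvBGo_nil : pvBGo [] = [] := by
  rw [pvBGo]; simp

theorem pvBGo_cons_nonbreak (c : Char) (cs : List Char) (h : pvNotBreak c = true) :
    pvBGo (c :: cs) = pvMerge [c] (pvBGo cs) := by
  conv_lhs => rw [pvBGo]
  conv_rhs => rw [pvBGo]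
  simp only [List.takeWhile_cons_of_pos h, List.dropWhile_cons_of_pos h]
  by_cases hr : cs.dropWhile pvNotBreak = []
  · simp only [dif_pos hr]
    split_ifs <;> simp_all [pvMerge]
  · simp only [dif_neg hr]
    split_ifs <;> simp [pvMerge]

theorem pvBGo_cons_nl (cs : List Char) : pvBGo ('\n' :: cs) = ['\n'] :: pvBGo cs := by
  conv_lhs => rw [pvBGo]
  have h : ¬ pvNotBreak '\n' = true := by decide
  simp [List.takeWhile_cons_of_neg h, List.dropWhile_cons_of_neg h]

theorem pvBGo_cons_crnl (cs : List Char) :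
    pvBGo ('\r' :: '\n' :: cs) = ['\r', '\n'] :: pvBGo cs := by
  conv_lhs => rw [pvBGo]
  have h : ¬ pvNotBreak '\r' = true := by decide
  simp [List.takeWhile_cons_of_neg h, List.dropWhile_cons_of_neg h]

theorem pvBGo_cons_cr (cs : List Char) (h : cs.head? ≠ some '\n') :
    pvBGo ('\r' :: cs) = ['\r'] :: pvBGo cs := by
  conv_lhs => rw [pvBGo]
  have hr : ¬ pvNotBreak '\r' = true := by decide
  simp [List.takeWhile_cons_of_neg hr, List.dropWhile_cons_of_neg hr, h]

theorem pvKey : ∀ (n : ℕ) (cs : List Char), cs.length = n → ∀ (lines : List String) (current : List Char),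
    pvAGo cs lines current = lines ++ (pvMerge current (pvBGo cs)).map String.mk := by
  intro n
  induction n using Nat.strong_induction_on with
  | _ n ih =>
    intro cs hn lines current
    match cs with
    | [] =>
      rw [pvAGo, pvBGo_nil]
      cases current <;> simp [pvMerge]
    | c :: rest =>
      rw [pvAGo]
      by_cases hnl : c = '\n'
      · subst hnl
        rw [if_pos rfl]
        rw [ih rest.length (by simp at hn; omega) rest rfl, pvMerge_nil, pvBGo_cons_nl]
        simp [pvMerge]
      · by_cases hcr : c = '\r'
        · subst hcr
          rw [if_neg (by decide : ¬ ('\r' : Char) = '\n'), if_pos rfl]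
          by_cases hla : rest.head? = some '\n'
          · rw [if_pos hla]
            cases rest with
            | nil => simp at hla
            | cons d rest' =>
              have hd : d = '\n' := by simpa using hla
              subst hd
              simp only [List.tail_cons]
              rw [ih rest'.length (by simp at hn; omega) rest' rfl, pvMerge_nil, pvBGo_cons_crnl]
              simp [pvMerge]
          · rw [if_neg hla,
                ih rest.length (by simp at hn; omega) rest rfl, pvMerge_nil,
                pvBGo_cons_cr rest hla]
            simp [pvMerge]
        · rw [if_neg hnl, if_neg hcr,
              ih rest.length (by simp at hn; omega) rest rfl lines (current ++ [c]),
              pvBGo_cons_nonbreak c rest (by simp [pvNotBreak, hnl, hcr]),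
              pvMerge_merge]

-- ===== VERDICT (by name: the statement is the Claim_ definition above) =====
theorem split_lines_preserve_endings_py_spec : Claim_equal_split_lines_preserve_endings_py := by
  intro content _
  unfold Spec_split_lines_preserve_endings_py split_lines_preserve_endings_py split_lines_preserve_endings_py_alt
  rw [pvKey content.toList.length content.toList rfl [] [], pvMerge_nil]
  simp
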